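-- pv_equiv track=rewrite | github.com/TKasperczyk/decant | src/decant/session.py | collect_tail_uuids
-- ===== SOURCE A (Python) =====
-- from collections import defaultdict
--
-- def build_children_map(messages: list[dict]) -> dict[str, list[str]]:
--     """Build parent_uuid -> [child_uuids] lookup."""
--     children: dict[str, list[str]] = defaultdict(list)
--     for msg in messages:
--         parent = msg.get("parentUuid")
--         uid = msg.get("uuid")
--         if parent and uid:
--             children[parent].append(uid)
--     return children
--
-- def collect_tail_uuids(messages: list[dict], boundary_uuid: str) -> set[str]:
--     """Collect all message UUIDs that belong to the tail (boundary and descendants).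
--
--     Uses BFS from the boundary message through the children graph.
--     """
--     children_map = build_children_map(messages)
--
--     tail: set[str] = set()
--     queue = [boundary_uuid]
--     while queue:
--         uid = queue.pop(0)
--         if uid in tail:
--             continue  # Cycle protection
--         tail.add(uid)
--         queue.extend(children_map.get(uid, []))
--
--     return tail
-- ===== SOURCE B (Python) =====
-- def collect_tail_uuids(messages: list[dict], boundary_uuid: str) -> set[str]:
--     """Fixpoint closure over the raw edge list: no children map, no queue.
--
--     Repeatedly sweep the (parent, uuid) edges, adding uuid whenever parent is
--     already in the tail, until a sweep adds nothing.  The least set containing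
--     the boundary and closed under the edges is exactly the BFS-reachable set.
--     """
--     edges = [(m.get("parentUuid"), m.get("uuid")) for m in messages
--              if m.get("parentUuid") and m.get("uuid")]
--     tail = {boundary_uuid}
--     changed = True
--     while changed:
--         changed = False
--         for parent, uid in edges:
--             if parent in tail and uid not in tail:
--                 tail.add(uid)
--                 changed = True
--     return tail
-- ===== Notes on version B (the rewrite author's own statement) =====
-- stated objective: alternative
-- what changed: Replaced A's children-map + FIFO-queue BFS by a fixpoint closure over the raw edge list: B builds no adjacency map and keeps no queue; it repeatedly sweeps the (parent, uuid) edges, adding uuid whenever parent is already in the tail, until a sweep adds nothing — the least set containing the boundary and closed under the edges equals A's BFS-reachable set.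
import Mathlib
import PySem

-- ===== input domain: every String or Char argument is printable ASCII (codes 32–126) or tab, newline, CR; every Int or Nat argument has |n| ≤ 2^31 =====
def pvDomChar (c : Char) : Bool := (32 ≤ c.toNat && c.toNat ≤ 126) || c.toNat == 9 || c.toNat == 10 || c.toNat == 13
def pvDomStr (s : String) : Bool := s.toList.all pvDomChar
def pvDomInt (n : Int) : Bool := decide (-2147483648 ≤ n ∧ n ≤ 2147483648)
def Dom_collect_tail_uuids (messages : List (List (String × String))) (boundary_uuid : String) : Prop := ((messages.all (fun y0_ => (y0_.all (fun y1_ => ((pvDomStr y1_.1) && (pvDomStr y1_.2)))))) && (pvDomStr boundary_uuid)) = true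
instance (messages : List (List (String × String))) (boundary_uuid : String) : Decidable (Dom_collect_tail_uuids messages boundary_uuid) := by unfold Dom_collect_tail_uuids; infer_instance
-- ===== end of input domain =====

-- B replaces A's children-map + FIFO-queue BFS by a fixpoint closure over the raw
-- (parent, uuid) edge list (sweep the edges until a sweep adds nothing); same returned set.
-- Both Pythons return a SET, whose iteration order Python does not define and PySem does
-- not model: each port returns the set's elements in sorted order (the same finite set,
-- in a canonical representation; set outputs are compared as finite sets).

-- ===== PORT A =====

-- msg.get(k) on a dict parameter (association list, first-match lookup)
def pvGet (msg : List (String × String)) (k : String) : Option String :=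
  (PySem.Dict.mk msg).get? k

-- build_children_map (helper of Source A)
def pvBuildChildren (messages : List (List (String × String))) : PySem.Dict String (List String) :=
  messages.foldl (fun d msg =>
    match pvGet msg "parentUuid", pvGet msg "uuid" with
    | some parent, some uid =>
        if parent ≠ "" ∧ uid ≠ "" then d.modify parent [] (· ++ [uid]) else d
    | _, _ => d) PySem.Dict.empty

-- children_map.get(uid, [])
def pvChild (cm : PySem.Dict String (List String)) (uid : String) : List String :=
  cm.getD uid []

-- finite universe of every uuid either loop can ever add: boundary + all dict values
def pvU (messages : List (List (String × String))) (boundary_uuid : String) : List String :=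
  boundary_uuid :: messages.flatMap (fun msg => msg.map Prod.snd)

-- length of a filter strictly drops when one satisfied element stops satisfying it (termination measure)
theorem pvFilterMono {α : Type} (U : List α) (p q : α → Bool)
    (hpq : ∀ x, q x = true → p x = true) :
    (U.filter q).length ≤ (U.filter p).length := by
  induction U with
  | nil => simp
  | cons a U ih =>
    by_cases hq : q a = true
    · simp [hq, hpq a hq]; omega
    · cases hp : p a <;>
        simp [hq, hp] <;> omega

theorem pvFilterLt {α : Type} (U : List α) (p q : α → Bool)
    (hpq : ∀ x, q x = true → p x = true)
    (u : α) (hu : u ∈ U) (hp : p u = true) (hq : q u = false) :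
    (U.filter q).length < (U.filter p).length := by
  induction U with
  | nil => cases hu
  | cons a U ih =>
    rcases List.mem_cons.mp hu with rfl | hu'
    · simp only [List.filter_cons, hp, hq, if_true]
      simp only [List.length_cons]
      exact Nat.lt_succ_of_le (pvFilterMono U p q hpq)
    · by_cases hqa : q a = true
      · simp [hqa, hpq a hqa]
        exact ih hu'
      · have := ih hu'
        cases hpa : p a <;> simp [hqa, hpa] <;> omega

-- msg.get values occur among the messages' values
theorem pvGet_mem (msg : List (String × String)) (k v : String)
    (h : pvGet msg k = some v) : v ∈ msg.map Prod.snd := by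
  induction msg with
  | nil => simp [pvGet, PySem.Dict.get?] at h
  | cons p rest ih =>
    rw [pvGet, PySem.Dict.get?_mk_cons] at h
    by_cases hk : p.1 == k
    · simp [hk] at h; simp [← h]
    · simp [hk] at h
      exact List.mem_cons_of_mem _ (ih (by rw [pvGet]; exact h))

-- children lists only contain uuid values occurring in messages, hence lie in pvU
theorem pvChildBound (messages : List (List (String × String))) (boundary_uuid : String) :
    ∀ u c, c ∈ pvChild (pvBuildChildren messages) u → c ∈ pvU messages boundary_uuid := by
  have main : ∀ (ms : List (List (String × String))) (d : PySem.Dict String (List String))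
      (P : String → Prop),
      (∀ key x, x ∈ d.getD key [] → P x) →
      (∀ msg ∈ ms, ∀ v, v ∈ msg.map Prod.snd → P v) →
      ∀ key x, x ∈ (ms.foldl (fun d msg =>
        match pvGet msg "parentUuid", pvGet msg "uuid" with
        | some parent, some uid =>
            if parent ≠ "" ∧ uid ≠ "" then d.modify parent [] (· ++ [uid]) else d
        | _, _ => d) d).getD key [] → P x := by
    intro ms
    induction ms with
    | nil => intro d P hd _ key x hx; exact hd key x hx
    | cons msg ms ih =>
      intro d P hd hms key x hx
      refine ih _ P ?_ (fun m hm => hms m (List.mem_cons_of_mem _ hm)) key x hx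
      intro key' x' hx'
      cases hpar : pvGet msg "parentUuid" with
      | none => simp only [hpar] at hx' ⊢; exact hd key' x' hx'
      | some parent =>
        cases huid : pvGet msg "uuid" with
        | none => exact hd key' x' (by simpa [hpar, huid] using hx')
        | some uid =>
          by_cases hne : parent ≠ "" ∧ uid ≠ ""
          · simp only [hpar, huid] at hx'
            rw [if_pos hne, PySem.Dict.getD_modify] at hx'
            by_cases hkey : key' = parent
            · simp only [hkey, if_true] at hx'
              rcases List.mem_append.mp hx' with h1 | h2
              · exact hd parent x' h1
              · have : x' = uid := by simpa using h2
                exact this ▸ hms msg List.mem_cons_self uid (pvGet_mem msg "uuid" uid huid)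
            · simp only [hkey, if_false] at hx'
              exact hd key' x' hx'
          · exact hd key' x' (by simpa [hpar, huid, hne] using hx')
  intro u c hc
  refine List.mem_cons_of_mem _ ?_
  exact main messages PySem.Dict.empty (fun v => v ∈ messages.flatMap (fun msg => msg.map Prod.snd))
    (by intro key x hx; simp [PySem.Dict.getD_empty] at hx)
    (by intro msg hm v hv; exact List.mem_flatMap.mpr ⟨msg, hm, hv⟩) u c hc

-- A's BFS loop: pop the queue head, skip visited, append children at the end.
-- The extra arguments U / hchild / hq only carry the termination invariant (queue ⊆ U).
def pvLoopA (child : String → List String) (U : List String)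
    (hchild : ∀ u c, c ∈ child u → c ∈ U)
    (tail : PySem.Set String) (queue : List String)
    (hq : ∀ u ∈ queue, u ∈ U) : List String :=
  match queue with
  | [] => tail
  | uid :: rest =>
    if h : PySem.Set.contains tail uid = true then
      pvLoopA child U hchild tail rest (fun u hu => hq u (List.mem_cons_of_mem _ hu))
    else
      pvLoopA child U hchild (PySem.Set.add tail uid) (rest ++ child uid)
        (fun u hu => (List.mem_append.mp hu).elim
          (fun h1 => hq u (List.mem_cons_of_mem _ h1))
          (fun h2 => hchild uid u h2))
  termination_by ((U.filter (fun x => !(PySem.Set.contains tail x))).length, queue.length)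
  decreasing_by
  · apply Prod.Lex.right; simp
  · apply Prod.Lex.left
    have huid : uid ∉ tail := fun hm => h ((PySem.Set.contains_iff _ _).mpr hm)
    rw [PySem.Set.add_of_not_mem huid]
    refine pvFilterLt U _ _ ?_ uid (hq uid List.mem_cons_self) ?_ ?_
    · intro x hx
      simp only [Bool.not_eq_true', ← Bool.not_eq_true, PySem.Set.contains_iff] at hx ⊢
      exact fun hm => hx (List.mem_append_left _ hm)
    · simp only [Bool.not_eq_true', ← Bool.not_eq_true, PySem.Set.contains_iff]
      exact huid
    · simp

-- the returned set (a Python set has no modelled iteration order), canonically sorted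
def collect_tail_uuids (messages : List (List (String × String))) (boundary_uuid : String) : List String :=
  PySem.List.sorted
    (pvLoopA (pvChild (pvBuildChildren messages)) (pvU messages boundary_uuid)
      (pvChildBound messages boundary_uuid) PySem.Set.empty [boundary_uuid]
      (fun u hu => by simpa [pvU] using Or.inl (List.mem_singleton.mp hu)))
    (fun x => x) false

-- ===== PORT B =====

-- the edge comprehension: [(m.get("parentUuid"), m.get("uuid")) for m in messages if … and …]
def pvEdges (messages : List (List (String × String))) : List (String × String) :=
  messages.filterMap (fun msg =>
    match pvGet msg "parentUuid", pvGet msg "uuid" with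
    | some parent, some uid =>
        if parent ≠ "" ∧ uid ≠ "" then some (parent, uid) else none
    | _, _ => none)

-- one edge of the sweep: if parent in tail and uid not in tail, add uid and set changed
def pvStepB (s : PySem.Set String × Bool) (e : String × String) : PySem.Set String × Bool :=
  if PySem.Set.contains s.1 e.1 && !(PySem.Set.contains s.1 e.2) then
    (PySem.Set.add s.1 e.2, true)
  else s

-- one whole sweep appends some new uuids ex (all edge targets, all fresh); changed ↔ ex ≠ []
theorem pvSweep_spec (edges : List (String × String)) :
    ∀ (t : PySem.Set String) (b : Bool),
      ∃ ex, (edges.foldl pvStepB (t, b)).1 = t ++ ex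
        ∧ (edges.foldl pvStepB (t, b)).2 = (b || !ex.isEmpty)
        ∧ ∀ x ∈ ex, x ∈ edges.map Prod.snd ∧ x ∉ t := by
  induction edges with
  | nil => intro t b; exact ⟨[], by simp⟩
  | cons e es ih =>
    intro t b
    by_cases hc : (PySem.Set.contains t e.1 && !(PySem.Set.contains t e.2)) = true
    · have h2 : e.2 ∉ t := by
        have := (Bool.and_eq_true _ _).mp hc |>.2
        simp only [Bool.not_eq_true', ← Bool.not_eq_true, PySem.Set.contains_iff] at this
        exact this
      have hstep : pvStepB (t, b) e = (t ++ [e.2], true) := by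
        unfold pvStepB; rw [if_pos hc, PySem.Set.add_of_not_mem h2]
      obtain ⟨ex, e1, e2, e3⟩ := ih (t ++ [e.2]) true
      refine ⟨e.2 :: ex, ?_, ?_, ?_⟩
      · rw [List.foldl_cons, hstep, e1, List.append_assoc]; rfl
      · rw [List.foldl_cons, hstep, e2]; simp
      · intro x hx
        rcases List.mem_cons.mp hx with rfl | hx'
        · exact ⟨by simp, h2⟩
        · exact ⟨List.mem_cons_of_mem _ (e3 x hx').1,
            fun hm => (e3 x hx').2 (List.mem_append_left _ hm)⟩
    · have hstep : pvStepB (t, b) e = (t, b) := by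
        unfold pvStepB; rw [if_neg hc]
      obtain ⟨ex, e1, e2, e3⟩ := ih t b
      refine ⟨ex, ?_, ?_, ?_⟩
      · rw [List.foldl_cons, hstep, e1]
      · rw [List.foldl_cons, hstep, e2]
      · exact fun x hx => ⟨List.mem_cons_of_mem _ (e3 x hx).1, (e3 x hx).2⟩

-- every edge target lies in pvU
theorem pvEdgeBound (messages : List (List (String × String))) (boundary_uuid : String) :
    ∀ e ∈ pvEdges messages, e.2 ∈ pvU messages boundary_uuid := by
  intro e he
  obtain ⟨msg, hmsg, hf⟩ := List.mem_filterMap.mp he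
  refine List.mem_cons_of_mem _ (List.mem_flatMap.mpr ⟨msg, hmsg, ?_⟩)
  cases hpar : pvGet msg "parentUuid" with
  | none => simp [hpar] at hf
  | some parent =>
    cases huid : pvGet msg "uuid" with
    | none => simp [hpar, huid] at hf
    | some uid =>
      simp only [hpar, huid] at hf
      split_ifs at hf
      cases hf
      exact pvGet_mem msg "uuid" uid huid

-- B's loop: while changed, sweep all edges once; the U/hE arguments carry termination only
def pvLoopB (edges : List (String × String)) (U : List String)
    (hE : ∀ e ∈ edges, e.2 ∈ U)
    (tail : PySem.Set String) : List String :=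
  if h : (edges.foldl pvStepB (tail, false)).2 = true then
    pvLoopB edges U hE (edges.foldl pvStepB (tail, false)).1
  else tail
  termination_by (U.filter (fun x => !(PySem.Set.contains tail x))).length
  decreasing_by
    simp only [List.foldl_attach]
    obtain ⟨ex, e1, e2, e3⟩ := pvSweep_spec edges tail false
    rw [e1]
    cases ex with
    | nil => rw [e2] at h; simp at h
    | cons u ex' =>
      have hu := e3 u List.mem_cons_self
      have huU : u ∈ U := by
        obtain ⟨e, heE, he2⟩ := List.mem_map.mp hu.1
        exact he2 ▸ hE e heE
      refine pvFilterLt U _ _ ?_ u huU ?_ ?_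
      · intro x hx
        simp only [Bool.not_eq_true', ← Bool.not_eq_true, PySem.Set.contains_iff] at hx ⊢
        exact fun hm => hx (List.mem_append_left _ hm)
      · simp only [Bool.not_eq_true', ← Bool.not_eq_true, PySem.Set.contains_iff]
        exact hu.2
      · simp

-- the returned set, canonically sorted (same representation choice as port A)
def collect_tail_uuids_alt (messages : List (List (String × String))) (boundary_uuid : String) : List String :=
  PySem.List.sorted
    (pvLoopB (pvEdges messages) (pvU messages boundary_uuid)
      (pvEdgeBound messages boundary_uuid) (PySem.Set.ofList [boundary_uuid]))
    (fun x => x) false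

-- ===== PRECONDITION & SPEC =====
def Spec_collect_tail_uuids (messages : List (List (String × String))) (boundary_uuid : String) (out : List String) : Prop := out = collect_tail_uuids_alt messages boundary_uuid
instance (messages : List (List (String × String))) (boundary_uuid : String) (out : List String) : Decidable (Spec_collect_tail_uuids messages boundary_uuid out) := by unfold Spec_collect_tail_uuids; infer_instance

-- ===== CLAIM (what is proved, stated in full; the proofs are below) =====
def Claim_equal_collect_tail_uuids : Prop := ∀ (messages : List (List (String × String))) (boundary_uuid : String), Dom_collect_tail_uuids messages boundary_uuid → Spec_collect_tail_uuids messages boundary_uuid (collect_tail_uuids messages boundary_uuid)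

-- ===== LEMMAS AND PROOFS =====

-- A's BFS result contains its tail and queue, and is closed under child outside the initial tail
theorem pvLoopA_char (child : String → List String) (U : List String)
    (hc : ∀ u c, c ∈ child u → c ∈ U) :
    ∀ (tail : PySem.Set String) (queue : List String) (hq : ∀ u ∈ queue, u ∈ U),
      (∀ x ∈ tail, x ∈ pvLoopA child U hc tail queue hq)
      ∧ (∀ x ∈ queue, x ∈ pvLoopA child U hc tail queue hq)
      ∧ (∀ u ∈ pvLoopA child U hc tail queue hq, u ∉ tail →
          ∀ c ∈ child u, c ∈ pvLoopA child U hc tail queue hq) := by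
  intro tail queue hq
  induction tail, queue, hq using pvLoopA.induct child U hc with
  | case1 tail hq _ =>
    rw [pvLoopA]
    exact ⟨fun x hx => hx, by simp, fun u hu hnu c _ => absurd hu hnu⟩
  | case2 tail uid rest hq h _ ih =>
    rw [pvLoopA, dif_pos h]
    obtain ⟨i1, i2, i3⟩ := ih
    refine ⟨i1, ?_, i3⟩
    intro x hx
    rcases List.mem_cons.mp hx with rfl | hx'
    · exact i1 x ((PySem.Set.contains_iff _ _).mp h)
    · exact i2 x hx'
  | case3 tail uid rest hq h _ ih =>
    rw [pvLoopA, dif_neg h]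
    obtain ⟨i1, i2, i3⟩ := ih
    have hmemadd : ∀ y, y ∈ PySem.Set.add tail uid ↔ y ∈ tail ∨ y = uid :=
      fun y => PySem.Set.mem_add tail uid y
    refine ⟨?_, ?_, ?_⟩
    · exact fun x hx => i1 x ((hmemadd x).mpr (Or.inl hx))
    · intro x hx
      rcases List.mem_cons.mp hx with rfl | hx'
      · exact i1 x ((hmemadd x).mpr (Or.inr rfl))
      · exact i2 x (List.mem_append_left _ hx')
    · intro u hu hnu c hcu
      by_cases huid : u = uid
      · exact i2 c (List.mem_append_right _ (huid ▸ hcu))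
      · exact i3 u hu (fun hm => (hmemadd u).mp hm |>.elim hnu huid) c hcu

-- A's BFS result is contained in any set containing tail and queue and closed under child
theorem pvLoopA_min (child : String → List String) (U : List String)
    (hc : ∀ u c, c ∈ child u → c ∈ U) :
    ∀ (tail : PySem.Set String) (queue : List String) (hq : ∀ u ∈ queue, u ∈ U)
      (P : String → Prop),
      (∀ x ∈ tail, P x) → (∀ x ∈ queue, P x) →
      (∀ u, P u → ∀ c ∈ child u, P c) →
      ∀ x ∈ pvLoopA child U hc tail queue hq, P x := by
  intro tail queue hq
  induction tail, queue, hq using pvLoopA.induct child U hc with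
  | case1 tail hq _ =>
    intro P ht _ _ x hx
    rw [pvLoopA] at hx
    exact ht x hx
  | case2 tail uid rest hq h _ ih =>
    intro P ht hqP hcl x hx
    rw [pvLoopA, dif_pos h] at hx
    exact ih P ht (fun y hy => hqP y (List.mem_cons_of_mem _ hy)) hcl x hx
  | case3 tail uid rest hq h _ ih =>
    intro P ht hqP hcl x hx
    rw [pvLoopA, dif_neg h] at hx
    have hPuid : P uid := hqP uid List.mem_cons_self
    refine ih P ?_ ?_ hcl x hx
    · intro y hy
      rcases (PySem.Set.mem_add _ _ _).mp hy with hy' | rfl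
      · exact ht y hy'
      · exact hPuid
    · intro y hy
      rcases List.mem_append.mp hy with hy' | hy'
      · exact hqP y (List.mem_cons_of_mem _ hy')
      · exact hcl uid hPuid y hy'

theorem pvLoopA_nodup (child : String → List String) (U : List String)
    (hc : ∀ u c, c ∈ child u → c ∈ U) :
    ∀ (tail : PySem.Set String) (queue : List String) (hq : ∀ u ∈ queue, u ∈ U),
      tail.Nodup → (pvLoopA child U hc tail queue hq).Nodup := by
  intro tail queue hq
  induction tail, queue, hq using pvLoopA.induct child U hc with
  | case1 tail hq _ => intro h; rw [pvLoopA]; exact h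
  | case2 tail uid rest hq h _ ih => intro hnd; rw [pvLoopA, dif_pos h]; exact ih hnd
  | case3 tail uid rest hq h _ ih =>
    intro hnd; rw [pvLoopA, dif_neg h]; exact ih (PySem.Set.nodup_add _ _ hnd)

-- a sweep that reports no change found every present parent's target already present
theorem pvSweep_closed (edges : List (String × String)) :
    ∀ (t : PySem.Set String), (edges.foldl pvStepB (t, false)).2 = false →
      ∀ e ∈ edges, e.1 ∈ t → e.2 ∈ t := by
  induction edges with
  | nil => intro t _ e he; cases he
  | cons e es ih =>
    intro t hfl e' he'
    by_cases hc : (PySem.Set.contains t e.1 && !(PySem.Set.contains t e.2)) = true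
    · exfalso
      have hstep : pvStepB (t, false) e = (PySem.Set.add t e.2, true) := by
        unfold pvStepB; rw [if_pos hc]
      rw [List.foldl_cons, hstep] at hfl
      obtain ⟨ex, _, e2, _⟩ := pvSweep_spec es (PySem.Set.add t e.2) true
      rw [e2] at hfl; simp at hfl
    · have hstep : pvStepB (t, false) e = (t, false) := by
        unfold pvStepB; rw [if_neg hc]
      rw [List.foldl_cons, hstep] at hfl
      rcases List.mem_cons.mp he' with rfl | he''
      · intro h1
        by_contra h2
        exact hc (by
          simp only [Bool.and_eq_true, Bool.not_eq_true', ← Bool.not_eq_true,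
            PySem.Set.contains_iff]
          exact ⟨h1, by simpa using h2⟩)
      · exact ih t hfl e' he''
  
-- a sweep stays inside any edge-closed superset of its tail
theorem pvSweep_min (edges : List (String × String)) (P : String → Prop)
    (hcl : ∀ e ∈ edges, P e.1 → P e.2) :
    ∀ (t : PySem.Set String) (b : Bool), (∀ x ∈ t, P x) →
      ∀ x ∈ (edges.foldl pvStepB (t, b)).1, P x := by
  induction edges with
  | nil => intro t b ht x hx; exact ht x hx
  | cons e es ih =>
    intro t b ht x hx
    rw [List.foldl_cons] at hx
    by_cases hc : (PySem.Set.contains t e.1 && !(PySem.Set.contains t e.2)) = true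
    · have hstep : pvStepB (t, b) e = (PySem.Set.add t e.2, true) := by
        unfold pvStepB; rw [if_pos hc]
      rw [hstep] at hx
      have hP2 : P e.2 := hcl e List.mem_cons_self
        (ht e.1 ((PySem.Set.contains_iff _ _).mp ((Bool.and_eq_true _ _).mp hc).1))
      refine ih (fun e' he' => hcl e' (List.mem_cons_of_mem _ he')) _ _ ?_ x hx
      intro y hy
      rcases (PySem.Set.mem_add _ _ _).mp hy with hy' | rfl
      · exact ht y hy'
      · exact hP2
    · have hstep : pvStepB (t, b) e = (t, b) := by
        unfold pvStepB; rw [if_neg hc]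
      rw [hstep] at hx
      exact ih (fun e' he' => hcl e' (List.mem_cons_of_mem _ he')) _ _ ht x hx

theorem pvSweep_nodup (edges : List (String × String)) :
    ∀ (t : PySem.Set String) (b : Bool), t.Nodup → ((edges.foldl pvStepB (t, b)).1).Nodup := by
  induction edges with
  | nil => intro t b h; exact h
  | cons e es ih =>
    intro t b h
    rw [List.foldl_cons]
    unfold pvStepB
    split_ifs
    · exact ih _ _ (PySem.Set.nodup_add _ _ h)
    · exact ih _ _ h

-- B's fixpoint contains its initial tail and is closed under the edges
theorem pvLoopB_char (edges : List (String × String)) (U : List String)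
    (hE : ∀ e ∈ edges, e.2 ∈ U) :
    ∀ (tail : PySem.Set String),
      (∀ x ∈ tail, x ∈ pvLoopB edges U hE tail)
      ∧ (∀ e ∈ edges, e.1 ∈ pvLoopB edges U hE tail → e.2 ∈ pvLoopB edges U hE tail) := by
  intro tail
  induction tail using pvLoopB.induct edges U hE with
  | case1 tail h ih =>
    simp only [List.foldl_attach] at ih
    rw [pvLoopB, dif_pos h]
    obtain ⟨i1, i2⟩ := ih
    refine ⟨?_, i2⟩
    intro x hx
    obtain ⟨ex, e1, _, _⟩ := pvSweep_spec edges tail false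
    exact i1 x (e1 ▸ List.mem_append_left _ hx)
  | case2 tail h =>
    rw [pvLoopB, dif_neg h]
    have hfl : (edges.foldl pvStepB (tail, false)).2 = false := by
      revert h; cases (edges.foldl pvStepB (tail, false)).2 <;> simp
    exact ⟨fun x hx => hx, fun e he h1 => pvSweep_closed edges tail hfl e he h1⟩

-- B's fixpoint is contained in any edge-closed superset of its initial tail
theorem pvLoopB_min (edges : List (String × String)) (U : List String)
    (hE : ∀ e ∈ edges, e.2 ∈ U) (P : String → Prop)
    (hcl : ∀ e ∈ edges, P e.1 → P e.2) :
    ∀ (tail : PySem.Set String), (∀ x ∈ tail, P x) →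
      ∀ x ∈ pvLoopB edges U hE tail, P x := by
  intro tail
  induction tail using pvLoopB.induct edges U hE with
  | case1 tail h ih =>
    simp only [List.foldl_attach] at ih
    intro ht x hx
    rw [pvLoopB, dif_pos h] at hx
    exact ih (pvSweep_min edges P hcl tail false ht) x hx
  | case2 tail h =>
    intro ht x hx
    rw [pvLoopB, dif_neg h] at hx
    exact ht x hx

theorem pvLoopB_nodup (edges : List (String × String)) (U : List String)
    (hE : ∀ e ∈ edges, e.2 ∈ U) :
    ∀ (tail : PySem.Set String), tail.Nodup → (pvLoopB edges U hE tail).Nodup := by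
  intro tail
  induction tail using pvLoopB.induct edges U hE with
  | case1 tail h ih =>
    simp only [List.foldl_attach] at ih
    intro hnd
    rw [pvLoopB, dif_pos h]
    exact ih (pvSweep_nodup edges tail false hnd)
  | case2 tail h =>
    intro hnd
    rw [pvLoopB, dif_neg h]
    exact hnd

-- build_children_map over messages = a modify-append fold over the edge list
theorem pvBuild_eq_edges (messages : List (List (String × String))) :
    ∀ (d : PySem.Dict String (List String)), messages.foldl (fun d msg =>
        match pvGet msg "parentUuid", pvGet msg "uuid" with
        | some parent, some uid =>
            if parent ≠ "" ∧ uid ≠ "" then d.modify parent [] (· ++ [uid]) else d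
        | _, _ => d) d
      = (pvEdges messages).foldl (fun d e => d.modify e.1 [] (· ++ [e.2])) d := by
  induction messages with
  | nil => intro d; rfl
  | cons msg ms ih =>
    intro d
    rw [List.foldl_cons, pvEdges, List.filterMap_cons]
    cases hpar : pvGet msg "parentUuid" with
    | none => simpa [hpar, pvEdges] using ih _
    | some parent =>
      cases huid : pvGet msg "uuid" with
      | none => simpa [hpar, huid, pvEdges] using ih _
      | some uid =>
        by_cases hne : parent ≠ "" ∧ uid ≠ ""
        · simpa [hpar, huid, hne, pvEdges] using ih _
        · simpa [hpar, huid, hne, pvEdges] using ih _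

-- c is a recorded child of p exactly when (p, c) is an edge
theorem pvChild_mem (messages : List (List (String × String))) (p c : String) :
    c ∈ pvChild (pvBuildChildren messages) p ↔ (p, c) ∈ pvEdges messages := by
  rw [pvChild, pvBuildChildren, pvBuild_eq_edges,
    PySem.Dict.getD_foldl_modify_append]
  simp only [PySem.Dict.getD_empty, List.nil_append, List.mem_map, List.mem_filter]
  constructor
  · rintro ⟨e, ⟨heE, hep⟩, rfl⟩
    have : e.1 = p := by simpa using hep
    exact (Prod.ext this.symm rfl : (p, e.2) = e) ▸ heE
  · intro h
    exact ⟨(p, c), ⟨h, by simp⟩, rfl⟩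

-- the two results are the same finite set
theorem pvMemIff (messages : List (List (String × String))) (boundary_uuid : String) :
    ∀ x, x ∈ pvLoopA (pvChild (pvBuildChildren messages)) (pvU messages boundary_uuid)
          (pvChildBound messages boundary_uuid) PySem.Set.empty [boundary_uuid]
          (fun u hu => by simpa [pvU] using Or.inl (List.mem_singleton.mp hu))
      ↔ x ∈ pvLoopB (pvEdges messages) (pvU messages boundary_uuid)
          (pvEdgeBound messages boundary_uuid) (PySem.Set.ofList [boundary_uuid]) := by
  intro x
  obtain ⟨bSuper, bClosed⟩ := pvLoopB_char (pvEdges messages) (pvU messages boundary_uuid)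
    (pvEdgeBound messages boundary_uuid) (PySem.Set.ofList [boundary_uuid])
  obtain ⟨aTail, aQueue, aClosed⟩ := pvLoopA_char (pvChild (pvBuildChildren messages))
    (pvU messages boundary_uuid) (pvChildBound messages boundary_uuid)
    PySem.Set.empty [boundary_uuid]
    (fun u hu => by simpa [pvU] using Or.inl (List.mem_singleton.mp hu))
  constructor
  · intro hx
    refine pvLoopA_min _ _ _ _ _ _ _ ?_ ?_ ?_ x hx
    · intro y hy; cases hy
    · intro y hy
      exact bSuper y ((PySem.Set.mem_ofList _ _).mpr (by simpa using List.mem_singleton.mp hy))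
    · intro u hu c hcu
      exact bClosed (u, c) ((pvChild_mem messages u c).mp hcu) hu
  · intro hx
    refine pvLoopB_min _ _ _ _ ?_ _ ?_ x hx
    · intro e heE h1
      exact aClosed e.1 h1 (fun hm => absurd hm (by simp [PySem.Set.empty]))
        e.2 ((pvChild_mem messages e.1 e.2).mpr heE)
    · intro y hy
      exact aQueue y (by simpa using (PySem.Set.mem_ofList _ _).mp hy)

-- ===== VERDICT (by name: the statement is the Claim_ definition above) =====
theorem collect_tail_uuids_spec : Claim_equal_collect_tail_uuids := by
  intro messages boundary_uuid _
  unfold Spec_collect_tail_uuids collect_tail_uuids collect_tail_uuids_alt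
  refine PySem.List.sorted_eq_sorted_of_perm _ _ _ (fun a b h => h) ?_
  refine (List.perm_ext_iff_of_nodup ?_ ?_).mpr (pvMemIff messages boundary_uuid)
  · exact pvLoopA_nodup _ _ _ _ _ _ List.nodup_nil
  · exact pvLoopB_nodup _ _ _ _ (PySem.Set.nodup_ofList _)
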